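-- pv_equiv track=rewrite | github.com/astronomer/astro-sdk | src/astro/utils/snowflake_merge_func.py | ensure_internal_quotes_closed
-- ===== SOURCE A (Python) =====
-- def ensure_internal_quotes_closed(name):
--     last_quoted = False
--     for c in name[1:-1]:
--         if last_quoted:
--             if c != '"':
--                 return False
--             last_quoted = False
--         elif c == '"':
--             last_quoted = True
--         # any character is fair game inside a properly quoted name
--
--     if last_quoted:
--         return False  # last quote was not escape
--
--     return True
-- ===== SOURCE B (Python) =====
-- def ensure_internal_quotes_closed(name):
--     return '"' not in name[1:-1].replace('""', '')
-- ===== Notes on version B (the rewrite author's own statement) =====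
-- stated objective: simpler
-- what changed: Replaces the character-by-character last_quoted state machine with a transform-then-test one-liner: greedily delete each doubled-quote pair from the inner string with str.replace, then test that no lone quote remains.
import Mathlib
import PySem

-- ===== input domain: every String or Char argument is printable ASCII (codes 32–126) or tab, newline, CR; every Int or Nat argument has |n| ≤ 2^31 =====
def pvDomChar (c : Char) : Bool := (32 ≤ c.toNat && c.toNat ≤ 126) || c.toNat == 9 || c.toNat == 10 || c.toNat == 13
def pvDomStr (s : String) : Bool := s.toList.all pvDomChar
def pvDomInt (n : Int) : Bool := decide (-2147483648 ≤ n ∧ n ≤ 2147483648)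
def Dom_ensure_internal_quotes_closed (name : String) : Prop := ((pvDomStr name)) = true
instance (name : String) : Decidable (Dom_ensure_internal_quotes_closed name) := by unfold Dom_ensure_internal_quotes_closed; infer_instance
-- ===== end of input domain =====

-- B replaces A's character-by-character state machine with a transform-then-test one-liner
-- (delete doubled quotes, then test for a lone quote); objective: simpler. Same O(n) cost.

-- ===== PORT A =====
-- the for-loop over name[1:-1] with its early returns and the last_quoted flag
def eiqcLoop : List Char → Bool → Bool
  | [], lastQuoted => !lastQuoted
  | c :: rest, lastQuoted =>
    if lastQuoted then
      if c ≠ '"' then false else eiqcLoop rest false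
    else if c = '"' then eiqcLoop rest true
    else eiqcLoop rest false

def ensure_internal_quotes_closed (name : String) : Bool :=
  eiqcLoop (PySem.Str.slice name (some 1) (some (-1))).toList false

-- ===== PORT B =====
def ensure_internal_quotes_closed_alt (name : String) : Bool :=
  !(PySem.Str.isIn "\"" (PySem.Str.replace (PySem.Str.slice name (some 1) (some (-1))) "\"\"" ""))

-- ===== PRECONDITION & SPEC =====
def Spec_ensure_internal_quotes_closed (name : String) (out : Bool) : Prop := out = ensure_internal_quotes_closed_alt name
instance (name : String) (out : Bool) : Decidable (Spec_ensure_internal_quotes_closed name out) := by unfold Spec_ensure_internal_quotes_closed; infer_instance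

-- ===== CLAIM (what is proved, stated in full; the proofs are below) =====
def Claim_equal_ensure_internal_quotes_closed : Prop := ∀ (name : String), Dom_ensure_internal_quotes_closed name → Spec_ensure_internal_quotes_closed name (ensure_internal_quotes_closed name)

-- ===== LEMMAS AND PROOFS =====

-- greedy left-to-right deletion of doubled quotes, as a plain recursion
def repQQ : List Char → List Char
  | [] => []
  | [c] => [c]
  | c₁ :: c₂ :: t =>
    if c₁ = '"' ∧ c₂ = '"' then repQQ t else c₁ :: repQQ (c₂ :: t)

lemma replace_go_eq (fuel : Nat) (l acc : List Char) (h : l.length ≤ fuel) :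
    PySem.Chars.replace.go ['"', '"'] [] fuel l acc = acc.reverse ++ repQQ l := by
  induction fuel generalizing l acc with
  | zero =>
    interval_cases hl : l.length
    cases l with
    | nil => simp [PySem.Chars.replace.go, repQQ]
    | cons c t => simp at hl
  | succ n ih =>
    cases l with
    | nil => simp [PySem.Chars.replace.go, repQQ]
    | cons c t =>
      cases t with
      | nil =>
        rw [PySem.Chars.replace.go]
        have hpre : List.isPrefixOf ['"', '"'] [c] = false := by
          simp [List.isPrefixOf]
        rw [hpre]
        simp only [Bool.false_eq_true, if_false]
        rw [ih [] (c :: acc) (by simp)]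
        simp [repQQ]
      | cons c₂ t₂ =>
        rw [PySem.Chars.replace.go]
        by_cases hp : c = '"' ∧ c₂ = '"'
        · obtain ⟨h1, h2⟩ := hp; subst h1; subst h2
          have hpre : List.isPrefixOf ['"', '"'] ('"' :: '"' :: t₂) = true := by
            simp [List.isPrefixOf]
          rw [hpre]
          simp only [if_true]
          rw [show List.drop (['"', '"'].length) ('"' :: '"' :: t₂) = t₂ from rfl,
              show ([] : List Char).reverse ++ acc = acc from rfl]
          rw [ih t₂ acc (by simp at h ⊢; omega)]
          simp [repQQ]
        · have hpre : List.isPrefixOf ['"', '"'] (c :: c₂ :: t₂) = false := by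
            simp [List.isPrefixOf]; tauto
          rw [hpre]
          simp only [Bool.false_eq_true, if_false]
          rw [ih (c₂ :: t₂) (c :: acc) (by simp at h ⊢; omega)]
          simp [repQQ, hp]

lemma replace_eq_repQQ (l : List Char) :
    PySem.Chars.replace l ['"', '"'] [] = repQQ l := by
  rw [PySem.Chars.replace]
  simp only [List.isEmpty_cons, Bool.false_eq_true, if_false]
  exact replace_go_eq l.length l [] le_rfl

lemma singleton_infix_iff (l : List Char) : ['"'] <:+: l ↔ '"' ∈ l := by
  constructor
  · rintro ⟨s, t, rfl⟩; simp
  · intro h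
    obtain ⟨s, t, rfl⟩ := List.append_of_mem h
    exact ⟨s, t, by simp⟩

-- the core equivalence: the state machine accepts iff no lone quote survives greedy pairing
lemma loop_eq_rep : ∀ l : List Char, eiqcLoop l false = !(decide ('"' ∈ repQQ l))
  | [] => by simp [eiqcLoop, repQQ]
  | [c] => by
    by_cases hc : c = '"'
    · subst hc; simp [eiqcLoop, repQQ]
    · simp [eiqcLoop, repQQ, hc, eq_comm]
  | c₁ :: c₂ :: t => by
    by_cases h1 : c₁ = '"'
    · subst h1
      by_cases h2 : c₂ = '"'
      · subst h2
        have := loop_eq_rep t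
        simp [eiqcLoop, repQQ, this]
      · simp [eiqcLoop, repQQ, h2]
    · have e : eiqcLoop (c₁ :: c₂ :: t) false
          = eiqcLoop (c₂ :: t) false := by
        simp [eiqcLoop, h1]
      rw [e, loop_eq_rep (c₂ :: t)]
      simp [repQQ, h1, eq_comm]

lemma isIn_quote_eq_mem (l : List Char) :
    PySem.Chars.isIn ['"'] l = decide ('"' ∈ l) := by
  by_cases hm : '"' ∈ l
  · simp only [hm, decide_true]
    rw [PySem.Chars.isIn_iff_infix]
    exact (singleton_infix_iff l).mpr hm
  · simp only [hm, decide_false]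
    rw [PySem.Chars.isIn_eq_false_iff]
    exact fun h => hm ((singleton_infix_iff l).mp h)

-- ===== VERDICT (by name: the statement is the Claim_ definition above) =====
theorem ensure_internal_quotes_closed_spec : Claim_equal_ensure_internal_quotes_closed := by
  intro name _
  unfold Spec_ensure_internal_quotes_closed ensure_internal_quotes_closed ensure_internal_quotes_closed_alt
  rw [loop_eq_rep]
  rw [PySem.Str.isIn_eq, PySem.Str.toList_replace,
      show ("\"" : String).toList = ['"'] from rfl,
      show ("\"\"" : String).toList = ['"', '"'] from rfl,
      show ("" : String).toList = ([] : List Char) from rfl,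
      replace_eq_repQQ, isIn_quote_eq_mem]
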